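-- pv_equiv track=rewrite | github.com/pallaire/AdventCode | 2023/10/pipemaze.py | scaleMazeByThree
-- ===== SOURCE A (Python) =====
-- def alloc2DCharArray(w, h, c):
--     res = []
--     for y in range(h):
--         row = []
--         for x in range(w):
--             row.append(c)
--         res.append(row)
--     return res
--
-- def scaleMazeByThree(data):
--     h = len(data)
--     w = len(data[0])
--     sw = w * 3
--     sh = h * 3
--
--     scaledData = alloc2DCharArray(sw, sh, '?')
--
--     mazeScale = {'F':['???',
--                       '?F-',
--                       '?|?'],
--                  '7':['???',
--                       '-7?',
--                       '?|?'],
--                  'J':['?|?',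
--                       '-J?',
--                       '???'],
--                  'L':['?|?',
--                       '?L-',
--                       '???'],
--                  '-':['???',
--                       '---',
--                       '???'],
--                  '|':['?|?',
--                       '?|?',
--                       '?|?'],
--                  'S':['?S?',
--                       'SSS',
--                       '?S?'],
--                  '.':['???',
--                       '?.?',
--                       '???'], }
--
--     for y in range(h):
--         for x in range(w):
--             c = data[y][x]
--
--             sx = x * 3
--             sy = y * 3
--
--             if c in mazeScale:
--                 s = mazeScale[c]
--
--                 for deltay in range(3):
--                     for deltax in range(3):
--                         scaledData[sy+deltay][sx + deltax] = s[deltay][deltax]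
--     return scaledData
-- ===== SOURCE B (Python) =====
-- def scaleMazeByThree(data):
--     h = len(data)
--     w = len(data[0])
--     default = ['???', '???', '???']
--     mazeScale = {'F': ['???', '?F-', '?|?'],
--                  '7': ['???', '-7?', '?|?'],
--                  'J': ['?|?', '-J?', '???'],
--                  'L': ['?|?', '?L-', '???'],
--                  '-': ['???', '---', '???'],
--                  '|': ['?|?', '?|?', '?|?'],
--                  'S': ['?S?', 'SSS', '?S?'],
--                  '.': ['???', '?.?', '???']}
--     res = []
--     for y in range(h):
--         for k in range(3):
--             row = []
--             for x in range(w):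
--                 row.extend(mazeScale.get(data[y][x], default)[k])
--             res.append(row)
--     return res
-- ===== Notes on version B (the rewrite author's own statement) =====
-- stated objective: simpler
-- what changed: Instead of pre-allocating a 3h x 3w grid of '?' and overwriting 3x3 blocks cell by cell, B builds each output row directly in template-line-major order, extending it with the three characters of the template line (unknown cells use an all-'?' default template), so no allocation pass and no in-place indexed writes remain.
import Mathlib
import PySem

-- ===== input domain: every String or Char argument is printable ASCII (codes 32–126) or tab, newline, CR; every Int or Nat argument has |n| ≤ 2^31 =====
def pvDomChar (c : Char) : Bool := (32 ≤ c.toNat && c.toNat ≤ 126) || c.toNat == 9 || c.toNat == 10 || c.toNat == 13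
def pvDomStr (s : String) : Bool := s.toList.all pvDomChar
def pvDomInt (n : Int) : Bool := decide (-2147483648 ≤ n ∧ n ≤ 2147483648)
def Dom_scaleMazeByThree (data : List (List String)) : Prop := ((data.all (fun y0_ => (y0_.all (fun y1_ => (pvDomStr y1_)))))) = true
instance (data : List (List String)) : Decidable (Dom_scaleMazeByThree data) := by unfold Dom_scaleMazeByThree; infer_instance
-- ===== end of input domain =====

-- B replaces A's allocate-a-'?'-grid-then-overwrite-3x3-blocks strategy by direct
-- row-by-row construction in template-line-major order (objective: simpler).

-- ===== PORT A =====
def pvMazeScale : PySem.Dict String (List String) :=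
  PySem.Dict.ofList
    [("F", ["???", "?F-", "?|?"]),
     ("7", ["???", "-7?", "?|?"]),
     ("J", ["?|?", "-J?", "???"]),
     ("L", ["?|?", "?L-", "???"]),
     ("-", ["???", "---", "???"]),
     ("|", ["?|?", "?|?", "?|?"]),
     ("S", ["?S?", "SSS", "?S?"]),
     (".", ["???", "?.?", "???"])]

def pvAlloc2DCharArray (w h : Int) (c : String) : List (List String) :=
  (PySem.List.pyRange 0 h 1).foldl
    (fun res _ =>
      res ++ [(PySem.List.pyRange 0 w 1).foldl (fun row _ => row ++ [c]) []])
    []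

-- indexing/assignment uses the total pyGetD/pySetD forms; Pre_ keeps every index in range,
-- exactly where the Python returns without an IndexError
def scaleMazeByThree (data : List (List String)) : List (List String) :=
  let h : Int := data.length
  let w : Int := (PySem.List.pyGetD data 0 []).length
  let sw : Int := w * 3
  let sh : Int := h * 3
  let scaledData := pvAlloc2DCharArray sw sh "?"
  (PySem.List.pyRange 0 h 1).foldl (fun sd y =>
    (PySem.List.pyRange 0 w 1).foldl (fun sd x =>
      let c := PySem.List.pyGetD (PySem.List.pyGetD data y []) x ""
      let sx := x * 3
      let sy := y * 3
      if pvMazeScale.contains c then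
        let s := (pvMazeScale.get? c).getD []
        (PySem.List.pyRange 0 3 1).foldl (fun sd dy =>
          (PySem.List.pyRange 0 3 1).foldl (fun sd dx =>
            PySem.List.pySetD sd (sy + dy)
              (PySem.List.pySetD (PySem.List.pyGetD sd (sy + dy) []) (sx + dx)
                (String.ofList [((PySem.Str.pyGet? (PySem.List.pyGetD s dy "") dx).getD ' ')])))
            sd) sd
      else sd) sd) scaledData

-- ===== PORT B =====
def pvDefault : List String := ["???", "???", "???"]

def pvMazeScaleB : PySem.Dict String (List String) :=
  PySem.Dict.ofList
    [("F", ["???", "?F-", "?|?"]),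
     ("7", ["???", "-7?", "?|?"]),
     ("J", ["?|?", "-J?", "???"]),
     ("L", ["?|?", "?L-", "???"]),
     ("-", ["???", "---", "???"]),
     ("|", ["?|?", "?|?", "?|?"]),
     ("S", ["?S?", "SSS", "?S?"]),
     (".", ["???", "?.?", "???"])]

def scaleMazeByThree_alt (data : List (List String)) : List (List String) :=
  let h : Int := data.length
  let w : Int := (PySem.List.pyGetD data 0 []).length
  (PySem.List.pyRange 0 h 1).foldl (fun res y =>
    (PySem.List.pyRange 0 3 1).foldl (fun res k =>
      let row := (PySem.List.pyRange 0 w 1).foldl (fun row x =>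
        row ++
          ((PySem.List.pyGetD
              (pvMazeScaleB.getD
                (PySem.List.pyGetD (PySem.List.pyGetD data y []) x "") pvDefault)
              k "").toList.map (fun ch => String.ofList [ch]))) []
      res ++ [row]) res) []

-- ===== PRECONDITION & SPEC =====
-- Pre_ excludes exactly the inputs on which the Python raises IndexError: empty data
-- (len(data[0])) and rows shorter than the first row (data[y][x] for x < w).
def Pre_scaleMazeByThree (data : List (List String)) : Prop :=
  data ≠ [] ∧ ∀ row ∈ data, (data.headD []).length ≤ row.length
instance (data : List (List String)) : Decidable (Pre_scaleMazeByThree data) := by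
  unfold Pre_scaleMazeByThree; infer_instance

def pvWitness_scaleMazeByThree : List (List String) := [["F", "."], ["|", "J"]]

def Spec_scaleMazeByThree (data : List (List String)) (out : List (List String)) : Prop := out = scaleMazeByThree_alt data
instance (data : List (List String)) (out : List (List String)) : Decidable (Spec_scaleMazeByThree data out) := by unfold Spec_scaleMazeByThree; infer_instance

-- ===== CLAIM (what is proved, stated in full; the proofs are below) =====
def Claim_equal_scaleMazeByThree : Prop := ∀ (data : List (List String)), Dom_scaleMazeByThree data → Pre_scaleMazeByThree data → Spec_scaleMazeByThree data (scaleMazeByThree data)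

-- ===== LEMMAS AND PROOFS =====

-- the three template lines of a cell, as lists of one-character strings
def pvCellRow (c : String) (k : Nat) : List String :=
  ((pvMazeScale.getD c pvDefault).getD k "").toList.map (fun ch => String.ofList [ch])

-- one output row: template line k of every cell of src, columns 0..w-1
def pvBRow (src : List String) (w k : Nat) : List String :=
  (List.range w).flatMap (fun x => pvCellRow (src.getD x "") k)

-- the common normal form of both ports
def pvSpecGrid (data : List (List String)) : List (List String) :=
  (List.range data.length).flatMap (fun y =>
    [pvBRow (data.getD y []) (data.getD 0 []).length 0,
     pvBRow (data.getD y []) (data.getD 0 []).length 1,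
     pvBRow (data.getD y []) (data.getD 0 []).length 2])

theorem alt_eq_spec (data : List (List String)) :
    scaleMazeByThree_alt data = pvSpecGrid data := by
  unfold scaleMazeByThree_alt pvSpecGrid
  rw [show pvMazeScaleB = pvMazeScale from rfl]
  simp only [PySem.List.pyRange_zero_natCast, List.foldl_map, PySem.List.pyGetD_natCast]
  have h3 : PySem.List.pyRange 0 3 = [0, 1, 2] := by decide
  rw [h3]
  simp only [List.foldl_cons, List.foldl_nil, PySem.List.foldl_append_eq_flatMap,
    List.nil_append, List.append_assoc, pvBRow, pvCellRow,
    PySem.List.pyGetD_ofNat', List.cons_append]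


-- A's inner per-cell action, factored out for the loop invariant
def pvStepA (c : String) (y x : Nat) (sd : List (List String)) : List (List String) :=
  if pvMazeScale.contains c then
    let s := (pvMazeScale.get? c).getD []
    (PySem.List.pyRange 0 3 1).foldl (fun sd dy =>
      (PySem.List.pyRange 0 3 1).foldl (fun sd dx =>
        PySem.List.pySetD sd ((y : Int) * 3 + dy)
          (PySem.List.pySetD (PySem.List.pyGetD sd ((y : Int) * 3 + dy) []) ((x : Int) * 3 + dx)
            (String.ofList [((PySem.Str.pyGet? (PySem.List.pyGetD s dy "") dx).getD ' ')])))
        sd) sd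
  else sd

-- first n columns of an output row
def pvBRowN (src : List String) (n k : Nat) : List String :=
  (List.range n).flatMap (fun x => pvCellRow (src.getD x "") k)

-- first n input rows of the normal form
def pvSpecN (data : List (List String)) (w n : Nat) : List (List String) :=
  (List.range n).flatMap (fun y =>
    [pvBRow (data.getD y []) w 0, pvBRow (data.getD y []) w 1, pvBRow (data.getD y []) w 2])

theorem pvAlloc_eq (w h : Int) (c : String) :
    pvAlloc2DCharArray w h c = List.replicate h.toNat (List.replicate w.toNat c) := by
  unfold pvAlloc2DCharArray
  simp only [PySem.List.pyRange_zero, List.foldl_map,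
    PySem.List.foldl_append_singleton_eq_map, List.nil_append, List.map_const', List.length_range]

theorem pvMS_mk : pvMazeScale = PySem.Dict.mk
    [("F", ["???", "?F-", "?|?"]), ("7", ["???", "-7?", "?|?"]), ("J", ["?|?", "-J?", "???"]),
     ("L", ["?|?", "?L-", "???"]), ("-", ["???", "---", "???"]), ("|", ["?|?", "?|?", "?|?"]),
     ("S", ["?S?", "SSS", "?S?"]), (".", ["???", "?.?", "???"])] := by decide

theorem pvMem_cases (c : String) (hc : pvMazeScale.contains c = true) :
    c = "F" ∨ c = "7" ∨ c = "J" ∨ c = "L" ∨ c = "-" ∨ c = "|" ∨ c = "S" ∨ c = "." := by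
  revert hc
  rw [pvMS_mk]
  simp [PySem.Dict.contains_mk]
  tauto

theorem pvCell_default (c : String) (hc : pvMazeScale.contains c = false) (k : Nat) (hk : k < 3) :
    pvCellRow c k = ["?", "?", "?"] := by
  have hget : pvMazeScale.get? c = none := by
    revert hc
    rw [pvMS_mk]
    simp [PySem.Dict.contains_mk, PySem.Dict.get?_mk_cons]
    intro n1 n2 n3 n4 n5 n6 n7 n8
    simp [n1, n2, n3, n4, n5, n6, n7, n8, PySem.Dict.get?]
  unfold pvCellRow
  rw [show pvMazeScale.getD c pvDefault = pvDefault from by simp [PySem.Dict.getD, hget]]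
  interval_cases k <;> decide

theorem pvLen_cellRow (c : String) (k : Nat) (hk : k < 3) : (pvCellRow c k).length = 3 := by
  by_cases hc : pvMazeScale.contains c = true
  · rcases pvMem_cases c hc with rfl | rfl | rfl | rfl | rfl | rfl | rfl | rfl <;>
      (interval_cases k <;> decide)
  · rw [pvCell_default c (by simpa using hc) k hk]; rfl

theorem pvLen_bRowN (src : List String) (n k : Nat) (hk : k < 3) :
    (pvBRowN src n k).length = 3 * n := by
  unfold pvBRowN
  rw [List.length_flatMap]
  rw [show (fun x => (pvCellRow (src.getD x "") k).length) = (fun _ => 3) from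
    funext fun x => pvLen_cellRow _ _ hk]
  simp [List.map_const', Nat.mul_comm]

theorem pvGrid_one (pre : List (List String)) (row : List String) (post : List (List String))
    (i : Int) (hi : i = (pre.length : Int)) (j : Int) (v : String) :
    PySem.List.pySetD (pre ++ row :: post) i
      (PySem.List.pySetD (PySem.List.pyGetD (pre ++ row :: post) i []) j v)
    = pre ++ (PySem.List.pySetD row j v) :: post := by
  subst hi
  rw [show PySem.List.pyGetD (pre ++ row :: post) (pre.length : Int) [] = row from by
    simp [PySem.List.pyGetD_natCast, List.getD]]
  rw [PySem.List.pySetD_natCast]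
  rw [List.set_append]
  simp

theorem pvRow3 (q t : List String) (j0 j1 j2 : Int) (v0 v1 v2 : String)
    (h0 : j0 = (q.length : Int)) (h1 : j1 = (q.length : Int) + 1) (h2 : j2 = (q.length : Int) + 2) :
    PySem.List.pySetD (PySem.List.pySetD (PySem.List.pySetD
      (q ++ "?" :: "?" :: "?" :: t) j0 v0) j1 v1) j2 v2 = q ++ v0 :: v1 :: v2 :: t := by
  subst h0 h1 h2
  rw [show ((q.length : Int) + 1) = ((q.length + 1 : Nat) : Int) from by push_cast; ring]
  rw [show ((q.length : Int) + 2) = ((q.length + 2 : Nat) : Int) from by push_cast; ring]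
  simp only [PySem.List.pySetD_natCast]
  rw [List.set_append, if_neg (by omega)]
  rw [List.set_append, if_neg (by omega)]
  rw [List.set_append, if_neg (by omega)]
  simp

theorem pvGrid_one' (pre : List (List String)) (a row : List String) (rest : List (List String))
    (i : Int) (hi : i = (pre.length : Int) + 1) (j : Int) (v : String) :
    PySem.List.pySetD (pre ++ a :: row :: rest) i
      (PySem.List.pySetD (PySem.List.pyGetD (pre ++ a :: row :: rest) i []) j v)
    = pre ++ a :: (PySem.List.pySetD row j v) :: rest := by
  rw [show pre ++ a :: row :: rest = (pre ++ [a]) ++ row :: rest from by simp]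
  rw [pvGrid_one (pre ++ [a]) row rest i (by rw [hi]; simp) j v]
  simp

theorem pvGrid_one'' (pre : List (List String)) (a b row : List String) (rest : List (List String))
    (i : Int) (hi : i = (pre.length : Int) + 2) (j : Int) (v : String) :
    PySem.List.pySetD (pre ++ a :: b :: row :: rest) i
      (PySem.List.pySetD (PySem.List.pyGetD (pre ++ a :: b :: row :: rest) i []) j v)
    = pre ++ a :: b :: (PySem.List.pySetD row j v) :: rest := by
  rw [show pre ++ a :: b :: row :: rest = (pre ++ [a, b]) ++ row :: rest from by simp]
  rw [pvGrid_one (pre ++ [a, b]) row rest i (by rw [hi]; simp) j v]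
  simp

theorem pvWrite9 (v : Int → Int → String) (pre post : List (List String))
    (q0 q1 q2 : List String) (y x k : Nat)
    (hpre : pre.length = 3 * y) (hq0 : q0.length = 3 * x) (hq1 : q1.length = 3 * x)
    (hq2 : q2.length = 3 * x) :
    (PySem.List.pyRange 0 3 1).foldl (fun sd dy =>
        (PySem.List.pyRange 0 3 1).foldl (fun sd dx =>
          PySem.List.pySetD sd ((y : Int) * 3 + dy)
            (PySem.List.pySetD (PySem.List.pyGetD sd ((y : Int) * 3 + dy) []) ((x : Int) * 3 + dx)
              (v dy dx))) sd)
      (pre ++ (q0 ++ List.replicate (k + 3) "?") :: (q1 ++ List.replicate (k + 3) "?")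
            :: (q2 ++ List.replicate (k + 3) "?") :: post)
    = pre ++ (q0 ++ [v 0 0, v 0 1, v 0 2] ++ List.replicate k "?")
          :: (q1 ++ [v 1 0, v 1 1, v 1 2] ++ List.replicate k "?")
          :: (q2 ++ [v 2 0, v 2 1, v 2 2] ++ List.replicate k "?") :: post := by
  have e3 : List.replicate (k + 3) ("?" : String) = "?" :: "?" :: "?" :: List.replicate k "?" := rfl
  rw [show PySem.List.pyRange 0 3 1 = [0, 1, 2] from by decide]
  simp only [List.foldl_cons, List.foldl_nil, e3]
  rw [pvGrid_one pre _ _ _ (by rw [hpre]; push_cast; ring)]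
  rw [pvGrid_one pre _ _ _ (by rw [hpre]; push_cast; ring)]
  rw [pvGrid_one pre _ _ _ (by rw [hpre]; push_cast; ring)]
  rw [pvRow3 q0 _ _ _ _ _ _ _ (by rw [hq0]; push_cast; ring) (by rw [hq0]; push_cast; ring)
    (by rw [hq0]; push_cast; ring)]
  rw [pvGrid_one' pre _ _ _ _ (by rw [hpre]; push_cast; ring)]
  rw [pvGrid_one' pre _ _ _ _ (by rw [hpre]; push_cast; ring)]
  rw [pvGrid_one' pre _ _ _ _ (by rw [hpre]; push_cast; ring)]
  rw [pvRow3 q1 _ _ _ _ _ _ _ (by rw [hq1]; push_cast; ring) (by rw [hq1]; push_cast; ring)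
    (by rw [hq1]; push_cast; ring)]
  rw [pvGrid_one'' pre _ _ _ _ _ (by rw [hpre]; push_cast; ring)]
  rw [pvGrid_one'' pre _ _ _ _ _ (by rw [hpre]; push_cast; ring)]
  rw [pvGrid_one'' pre _ _ _ _ _ (by rw [hpre]; push_cast; ring)]
  rw [pvRow3 q2 _ _ _ _ _ _ _ (by rw [hq2]; push_cast; ring) (by rw [hq2]; push_cast; ring)
    (by rw [hq2]; push_cast; ring)]
  simp

theorem pvTriple_congr {pre post : List (List String)} {q0 q1 q2 rep : List String}
    {L0 L1 L2 M0 M1 M2 : List String} (h0 : L0 = M0) (h1 : L1 = M1) (h2 : L2 = M2) :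
    pre ++ (q0 ++ L0 ++ rep) :: (q1 ++ L1 ++ rep) :: (q2 ++ L2 ++ rep) :: post
    = pre ++ (q0 ++ M0 ++ rep) :: (q1 ++ M1 ++ rep) :: (q2 ++ M2 ++ rep) :: post := by
  rw [h0, h1, h2]

theorem pvStepA_eq (c : String) (y x k : Nat) (pre post : List (List String))
    (q0 q1 q2 : List String) (hpre : pre.length = 3 * y) (hq0 : q0.length = 3 * x)
    (hq1 : q1.length = 3 * x) (hq2 : q2.length = 3 * x) :
    pvStepA c y x (pre ++ (q0 ++ List.replicate (k + 3) "?") :: (q1 ++ List.replicate (k + 3) "?")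
        :: (q2 ++ List.replicate (k + 3) "?") :: post)
    = pre ++ (q0 ++ pvCellRow c 0 ++ List.replicate k "?")
          :: (q1 ++ pvCellRow c 1 ++ List.replicate k "?")
          :: (q2 ++ pvCellRow c 2 ++ List.replicate k "?") :: post := by
  by_cases hc : pvMazeScale.contains c = true
  · unfold pvStepA
    rw [if_pos hc]
    rw [pvWrite9 (fun dy dx => String.ofList
        [((PySem.Str.pyGet? (PySem.List.pyGetD ((pvMazeScale.get? c).getD []) dy "") dx).getD ' ')])
      pre post q0 q1 q2 y x k hpre hq0 hq1 hq2]
    obtain rfl | rfl | rfl | rfl | rfl | rfl | rfl | rfl := pvMem_cases c hc <;>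
      exact pvTriple_congr (by decide) (by decide) (by decide)
  · unfold pvStepA
    rw [if_neg hc]
    rw [pvCell_default c (by simpa using hc) 0 (by omega),
        pvCell_default c (by simpa using hc) 1 (by omega),
        pvCell_default c (by simpa using hc) 2 (by omega)]
    simp [show List.replicate (k + 3) ("?" : String) = "?" :: "?" :: "?" :: List.replicate k "?" from rfl]

theorem pvXfold (src : List String) (w y : Nat) (pre post : List (List String))
    (hpre : pre.length = 3 * y) : ∀ n, n ≤ w →
    (List.range n).foldl (fun sd x => pvStepA (src.getD x "") y x sd)
      (pre ++ (List.replicate (3 * w) "?") :: (List.replicate (3 * w) "?")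
            :: (List.replicate (3 * w) "?") :: post)
    = pre ++ (pvBRowN src n 0 ++ List.replicate (3 * (w - n)) "?")
          :: (pvBRowN src n 1 ++ List.replicate (3 * (w - n)) "?")
          :: (pvBRowN src n 2 ++ List.replicate (3 * (w - n)) "?") :: post := by
  intro n
  induction n with
  | zero => intro _; simp [pvBRowN]
  | succ n ih =>
    intro hn
    rw [List.range_succ, List.foldl_append, ih (by omega)]
    rw [show 3 * (w - n) = 3 * (w - (n + 1)) + 3 from by omega]
    simp only [List.foldl_cons, List.foldl_nil]
    rw [pvStepA_eq (src.getD n "") y n (3 * (w - (n + 1))) pre post _ _ _ hpre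
      (pvLen_bRowN src n 0 (by omega)) (pvLen_bRowN src n 1 (by omega))
      (pvLen_bRowN src n 2 (by omega))]
    have hb : ∀ kk : Nat, pvBRowN src n kk ++ pvCellRow (src.getD n "") kk = pvBRowN src (n + 1) kk := by
      intro kk
      unfold pvBRowN
      rw [List.range_succ, List.flatMap_append]
      simp
    rw [← hb 0, ← hb 1, ← hb 2]

theorem pvYfold (data : List (List String)) (w : Nat) : ∀ n, n ≤ data.length →
    (List.range n).foldl (fun sd y =>
        (List.range w).foldl (fun sd x => pvStepA ((data.getD y []).getD x "") y x sd) sd)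
      (List.replicate (3 * data.length) (List.replicate (3 * w) "?"))
    = pvSpecN data w n
        ++ List.replicate (3 * (data.length - n)) (List.replicate (3 * w) "?") := by
  intro n
  induction n with
  | zero => intro _; simp [pvSpecN]
  | succ n ih =>
    intro hn
    rw [List.range_succ, List.foldl_append, ih (by omega)]
    simp only [List.foldl_cons, List.foldl_nil]
    rw [show 3 * (data.length - n) = 3 * (data.length - (n + 1)) + 3 from by omega]
    rw [show List.replicate (3 * (data.length - (n + 1)) + 3) (List.replicate (3 * w) ("?" : String))
      = List.replicate (3 * w) "?" :: List.replicate (3 * w) "?" :: List.replicate (3 * w) "?"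
        :: List.replicate (3 * (data.length - (n + 1))) (List.replicate (3 * w) "?") from rfl]
    have hlen : (pvSpecN data w n).length = 3 * n := by
      unfold pvSpecN
      rw [List.length_flatMap]
      rw [show (fun y => ([pvBRow (data.getD y []) w 0, pvBRow (data.getD y []) w 1,
        pvBRow (data.getD y []) w 2].length)) = (fun _ => 3) from funext fun y => rfl]
      simp [List.map_const', Nat.mul_comm]
    rw [pvXfold (data.getD n []) w n (pvSpecN data w n) _ hlen w (Nat.le_refl w)]
    rw [show pvSpecN data w (n + 1) = pvSpecN data w n ++ [pvBRow (data.getD n []) w 0,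
      pvBRow (data.getD n []) w 1, pvBRow (data.getD n []) w 2] from by
        unfold pvSpecN; rw [List.range_succ, List.flatMap_append]; simp]
    simp [pvBRowN, pvBRow]

theorem a_eq_spec (data : List (List String)) :
    scaleMazeByThree data = pvSpecGrid data := by
  simp only [scaleMazeByThree]
  rw [pvAlloc_eq]
  rw [show (((PySem.List.pyGetD data 0 []).length : Int) * 3).toNat
      = 3 * (PySem.List.pyGetD data 0 []).length from by omega]
  rw [show (((data.length : Int)) * 3).toNat = 3 * data.length from by omega]
  simp only [PySem.List.pyRange_zero_natCast, List.foldl_map, PySem.List.pyGetD_natCast,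
    PySem.List.pyGetD_zero]
  show (List.range data.length).foldl (fun sd y =>
      (List.range ((data.getD 0 []).length)).foldl
        (fun sd x => pvStepA ((data.getD y []).getD x "") y x sd) sd)
    (List.replicate (3 * data.length) (List.replicate (3 * (data.getD 0 []).length) "?"))
    = pvSpecGrid data
  rw [pvYfold data ((data.getD 0 []).length) data.length (Nat.le_refl _)]
  simp [pvSpecN, pvSpecGrid]


-- ===== VERDICT (by name: the statement is the Claim_ definition above) =====
theorem scaleMazeByThree_spec : Claim_equal_scaleMazeByThree := by
  intro data _ _
  unfold Spec_scaleMazeByThree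
  rw [a_eq_spec, alt_eq_spec]
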